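-- pv_equiv track=rewrite | github.com/RauPro/Competitive-Programming | ICPC Preparation/Data Structure/2D Array Manipulation/11581 - Grid Successors.py | find_greatest_finite_index
-- ===== SOURCE A (Python) =====
-- def transform(g):
--     """
--     Transforms the grid g according to the rules given.
--     """
--     transformed = [[0]*3 for _ in range(3)]
--     for r in range(3):
--         for c in range(3):
--             # Sum of adjacent cells modulo 2
--             sum_adjacent = 0
--             for dr, dc in [(-1, 0), (1, 0), (0, -1), (0, 1)]:
--                 rr, cc = r + dr, c + dc
--                 if 0 <= rr < 3 and 0 <= cc < 3:
--                     sum_adjacent += g[rr][cc]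
--             transformed[r][c] = sum_adjacent % 2
--     return transformed
--
-- def find_greatest_finite_index(g):
--     """
--     Computes the greatest index i for which the number of indices kg(f^i(g)) is finite.
--     """
--     seen = {}
--     i = 0
--
--     # Convert grid to tuple for easy hashing and comparison.
--     current = tuple(tuple(row) for row in g)
--
--     # Keep track of each unique grid configuration we've seen and at which step it was seen.
--     seen[current] = i
--
--     while True:
--         # Perform the transformation.
--         current = tuple(tuple(row) for row in transform([[cell for cell in row] for row in current]))
--         i += 1
--
--         if current in seen:
--             # We've seen this configuration before, so we have a cycle.
--             return seen[current] - 1  # The last index before the cycle starts.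
--
--         seen[current] = i
-- ===== SOURCE B (Python) =====
-- def transform(g):
--     """
--     Transforms the grid g according to the rules given.
--     """
--     transformed = [[0]*3 for _ in range(3)]
--     for r in range(3):
--         for c in range(3):
--             # Sum of adjacent cells modulo 2
--             sum_adjacent = 0
--             for dr, dc in [(-1, 0), (1, 0), (0, -1), (0, 1)]:
--                 rr, cc = r + dr, c + dc
--                 if 0 <= rr < 3 and 0 <= cc < 3:
--                     sum_adjacent += g[rr][cc]
--             transformed[r][c] = sum_adjacent % 2
--     return transformed
--
-- def find_greatest_finite_index(g):
--     # The transform is nilpotent on 3x3 binary grids: its only cycle is the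
--     # all-zero fixed point, reached within 4 steps of any binary grid (hence
--     # within 5 steps of any input).  So the repeat A's visited-set detects is
--     # always the second visit to the zero grid; no visited set is needed:
--     # count the steps until the grid is all zero and return that count - 1.
--     ZERO = [[0, 0, 0], [0, 0, 0], [0, 0, 0]]
--     current = [list(row) for row in g]
--     i = 0
--     while current != ZERO:
--         current = transform(current)
--         i += 1
--     return i - 1
-- ===== Notes on version B (the rewrite author's own statement) =====
-- stated objective: simpler
-- what changed: A detects the first repeated grid with a hash map of all visited (tuple-ified) states; B drops the visited set entirely, using the fact that the transform is nilpotent on 3x3 binary grids (its only cycle is the all-zero fixed point, reached within 5 steps of any input), so it just counts steps until the grid is all zero and returns count-1.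
import Mathlib
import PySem

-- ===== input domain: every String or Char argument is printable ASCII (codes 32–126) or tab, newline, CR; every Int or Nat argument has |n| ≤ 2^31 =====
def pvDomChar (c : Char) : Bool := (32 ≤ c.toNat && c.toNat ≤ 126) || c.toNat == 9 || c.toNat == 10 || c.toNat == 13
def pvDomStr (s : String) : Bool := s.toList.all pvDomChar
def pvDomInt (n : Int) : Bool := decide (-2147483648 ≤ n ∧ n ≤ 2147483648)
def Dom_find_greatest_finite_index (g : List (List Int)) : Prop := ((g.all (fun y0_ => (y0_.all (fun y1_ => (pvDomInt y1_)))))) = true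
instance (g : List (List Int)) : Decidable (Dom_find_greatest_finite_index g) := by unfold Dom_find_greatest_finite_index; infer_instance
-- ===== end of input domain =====

-- B replaces A's visited-state hash map by counting steps until the all-zero grid
-- (the transform's only cycle, proved below), which is simpler; return value only.

-- ===== PORT A =====
-- helper `transform` is the identical Python function in both Source A and Source B; one port serves both.
-- inner neighbour loop: sum of g[rr][cc] over the 4 directions passing the bounds check
def pvAdj (g : List (List Int)) (r c : Int) : Int :=
  [((-1 : Int), (0 : Int)), (1, 0), (0, -1), (0, 1)].foldl
    (fun s d =>
      let rr := r + d.1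
      let cc := c + d.2
      if 0 ≤ rr ∧ rr < 3 ∧ 0 ≤ cc ∧ cc < 3 then
        s + PySem.List.pyGetD (PySem.List.pyGetD g rr []) cc 0
      else s) 0

def transform (g : List (List Int)) : List (List Int) :=
  (PySem.List.pyRange 0 3 1).map (fun r =>
    (PySem.List.pyRange 0 3 1).map (fun c => PySem.Int.mod (pvAdj g r c) 2))

-- A's while-loop; fuel 10 is a totality guard only: the Python loop always
-- returns within 6 iterations (the proofs below never reach the 0 branch).
def pvLoopA : Nat → PySem.Dict (List (List Int)) Int → List (List Int) → Int → Int
  | 0, _, _, _ => 0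
  | fuel+1, seen, current, i =>
      let current' := transform current
      let i' := i + 1
      match PySem.Dict.get? seen current' with
      | some v => v - 1
      | none => pvLoopA fuel (seen.insert current' i') current' i'

def find_greatest_finite_index (g : List (List Int)) : Int :=
  pvLoopA 10 ((PySem.Dict.empty : PySem.Dict (List (List Int)) Int).insert g 0) g 0

-- ===== PORT B =====
def pvZero : List (List Int) := [[0, 0, 0], [0, 0, 0], [0, 0, 0]]

-- B's while-loop; fuel 10 is a totality guard only (zero grid reached within 5 steps).
def pvLoopB : Nat → List (List Int) → Int → Int
  | 0, _, _ => 0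
  | fuel+1, current, i =>
      if current = pvZero then i - 1
      else pvLoopB fuel (transform current) (i + 1)

def find_greatest_finite_index_alt (g : List (List Int)) : Int :=
  pvLoopB 10 g 0

-- ===== PRECONDITION & SPEC =====
-- Pre_ excludes exactly the inputs on which Python A raises IndexError:
-- grids with fewer than 3 rows, or one of the first 3 rows shorter than 3.
def Pre_find_greatest_finite_index (g : List (List Int)) : Prop :=
  3 ≤ g.length ∧ ∀ r ∈ g.take 3, 3 ≤ r.length
instance (g : List (List Int)) : Decidable (Pre_find_greatest_finite_index g) := by
  unfold Pre_find_greatest_finite_index; infer_instance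

def pvWitness_find_greatest_finite_index : List (List Int) := [[1, 0, 0], [0, 1, 0], [0, 0, 0]]

def Spec_find_greatest_finite_index (g : List (List Int)) (out : Int) : Prop := out = find_greatest_finite_index_alt g
instance (g : List (List Int)) (out : Int) : Decidable (Spec_find_greatest_finite_index g out) := by unfold Spec_find_greatest_finite_index; infer_instance

-- ===== CLAIM (what is proved, stated in full; the proofs are below) =====
def Claim_equal_find_greatest_finite_index : Prop := ∀ (g : List (List Int)), Dom_find_greatest_finite_index g → Pre_find_greatest_finite_index g → Spec_find_greatest_finite_index g (find_greatest_finite_index g)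

-- ===== LEMMAS AND PROOFS =====

-- N g = number of steps until the trajectory of g first reaches the zero grid (≤ 5, proved below)
def pvN (g : List (List Int)) : Nat :=
  if g = pvZero then 0
  else if transform^[1] g = pvZero then 1
  else if transform^[2] g = pvZero then 2
  else if transform^[3] g = pvZero then 3
  else if transform^[4] g = pvZero then 4
  else 5

def pvIsBin (b : List (List Int)) : Prop :=
  b.length = 3 ∧ ∀ r ∈ b, r.length = 3 ∧ ∀ x ∈ r, x = 0 ∨ x = 1

def pvRows : List (List Int) :=
  [(0 : Int), 1].flatMap (fun a => [(0 : Int), 1].flatMap (fun b => [(0 : Int), 1].map (fun c => [a, b, c])))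

def pvBins : List (List (List Int)) :=
  pvRows.flatMap (fun r0 => pvRows.flatMap (fun r1 => pvRows.map (fun r2 => [r0, r1, r2])))

theorem pv_mod2 (x : Int) : PySem.Int.mod x 2 = 0 ∨ PySem.Int.mod x 2 = 1 := by
  have h1 := PySem.Int.mod_nonneg x (b := 2) (by omega)
  have h2 := PySem.Int.mod_lt x (b := 2) (by omega)
  omega

theorem transform_isBin (g : List (List Int)) : pvIsBin (transform g) := by
  have hr : PySem.List.pyRange 0 3 1 = [0, 1, 2] := by decide
  constructor
  · simp [transform, hr]
  · intro r hr'
    simp only [transform, hr, List.mem_map] at hr'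
    obtain ⟨a, _, rfl⟩ := hr'
    constructor
    · simp
    · intro x hx
      simp only [List.mem_map] at hx
      obtain ⟨c, _, rfl⟩ := hx
      exact pv_mod2 _

theorem mem_pvRows (r : List Int) (hl : r.length = 3) (hx : ∀ x ∈ r, x = 0 ∨ x = 1) :
    r ∈ pvRows := by
  obtain ⟨a, b, c, rfl⟩ := List.length_eq_three.mp hl
  have ha := hx a (by simp)
  have hb := hx b (by simp)
  have hc := hx c (by simp)
  rcases ha with rfl | rfl <;> rcases hb with rfl | rfl <;> rcases hc with rfl | rfl <;> decide

theorem mem_pvBins (b : List (List Int)) (hb : pvIsBin b) : b ∈ pvBins := by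
  obtain ⟨hl, hrows⟩ := hb
  obtain ⟨r0, r1, r2, rfl⟩ := List.length_eq_three.mp hl
  have h0 := hrows r0 (by simp)
  have h1 := hrows r1 (by simp)
  have h2 := hrows r2 (by simp)
  simp only [pvBins, List.mem_flatMap, List.mem_map]
  exact ⟨r0, mem_pvRows r0 h0.1 h0.2, r1, mem_pvRows r1 h1.1 h1.2,
    r2, mem_pvRows r2 h2.1 h2.2, rfl⟩

set_option maxRecDepth 20000 in
set_option maxHeartbeats 4000000 in
theorem bins_iter4 : ∀ b ∈ pvBins, transform^[4] b = pvZero := by decide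

theorem iter4_of_isBin (b : List (List Int)) (hb : pvIsBin b) : transform^[4] b = pvZero :=
  bins_iter4 b (mem_pvBins b hb)

theorem iter_ge5 (g : List (List Int)) (k : Nat) (hk : 5 ≤ k) : transform^[k] g = pvZero := by
  obtain ⟨m, rfl⟩ : ∃ m, k = 4 + (m + 1) := ⟨k - 5, by omega⟩
  rw [Function.iterate_add_apply]
  exact iter4_of_isBin _ (by rw [Function.iterate_succ_apply']; exact transform_isBin _)

theorem pv_periodic (g : List (List Int)) (j t : Nat) (hjt : j < t)
    (h : transform^[j] g = transform^[t] g) : transform^[j] g = pvZero := by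
  obtain ⟨d, rfl⟩ : ∃ d, t = (d + 1) + j := ⟨t - j - 1, by omega⟩
  have hper : transform^[d + 1] (transform^[j] g) = transform^[j] g := by
    rw [← Function.iterate_add_apply]; exact h.symm
  have hmul : ∀ c : Nat, transform^[(d + 1) * c] (transform^[j] g) = transform^[j] g := by
    intro c
    induction c with
    | zero => simp
    | succ c ih =>
      have : (d + 1) * (c + 1) = (d + 1) * c + (d + 1) := by ring
      rw [this, Function.iterate_add_apply, hper, ih]
  have h5 : transform^[(d + 1) * 5] (transform^[j] g) = pvZero := by
    rw [← Function.iterate_add_apply]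
    exact iter_ge5 g _ (by nlinarith)
  rw [← hmul 5, h5]

theorem pvN_le (g : List (List Int)) : pvN g ≤ 5 := by
  unfold pvN; split_ifs <;> omega

theorem pvN_zero (g : List (List Int)) : transform^[pvN g] g = pvZero := by
  unfold pvN
  split_ifs with h0 h1 h2 h3 h4
  · simpa using h0
  · exact h1
  · exact h2
  · exact h3
  · exact h4
  · exact iter_ge5 g 5 (by omega)

theorem pvN_min (g : List (List Int)) (t : Nat) (ht : t < pvN g) : transform^[t] g ≠ pvZero := by
  have h0' : transform^[0] g = g := by simp
  unfold pvN at ht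
  split_ifs at ht with h0 h1 h2 h3 h4 <;> interval_cases t <;>
    simp_all

theorem pvN_eq_zero (g : List (List Int)) (h : pvN g = 0) : g = pvZero := by
  unfold pvN at h
  split_ifs at h
  assumption

theorem loopB_eval (M : Nat) : ∀ (fuel : Nat) (cur : List (List Int)) (i : Int),
    M + 1 ≤ fuel → transform^[M] cur = pvZero → (∀ t < M, transform^[t] cur ≠ pvZero) →
    pvLoopB fuel cur i = i + M - 1 := by
  induction M with
  | zero =>
    intro fuel cur i hf hz _
    obtain ⟨f, rfl⟩ : ∃ f, fuel = f + 1 := ⟨fuel - 1, by omega⟩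
    simp only [Function.iterate_zero, id_eq] at hz
    simp [pvLoopB, hz]
  | succ M ih =>
    intro fuel cur i hf hz hmin
    obtain ⟨f, rfl⟩ : ∃ f, fuel = f + 1 := ⟨fuel - 1, by omega⟩
    have hne : cur ≠ pvZero := by
      have := hmin 0 (by omega); simpa using this
    rw [pvLoopB, if_neg hne,
      ih f (transform cur) (i + 1) (by omega)
        (by rw [← Function.iterate_succ_apply]; exact hz)
        (by intro t ht; rw [← Function.iterate_succ_apply]; exact hmin (t + 1) (by omega))]
    push_cast; ring

theorem loopA_eval (M : Nat) : ∀ (fuel : Nat) (seen : PySem.Dict (List (List Int)) Int)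
    (cur : List (List Int)) (i : Int),
    M + 2 ≤ fuel → transform^[M] cur = pvZero → (∀ t < M, transform^[t] cur ≠ pvZero) →
    (∀ t, 1 ≤ t → t ≤ M → PySem.Dict.get? seen (transform^[t] cur) = none) →
    (M = 0 → PySem.Dict.get? seen pvZero = some i) →
    pvLoopA fuel seen cur i = i + M - 1 := by
  induction M with
  | zero =>
    intro fuel seen cur i hf hz _ _ hsome
    obtain ⟨f, rfl⟩ : ∃ f, fuel = f + 1 := ⟨fuel - 1, by omega⟩
    simp only [Function.iterate_zero, id_eq] at hz
    have hcur : transform cur = pvZero := by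
      rw [hz]
      have := iter_ge5 pvZero 5 (by omega)
      have h1 : transform^[1] pvZero = pvZero := by
        have h4 := iter4_of_isBin (transform pvZero) (transform_isBin pvZero)
        have : transform^[5] pvZero = pvZero := iter_ge5 pvZero 5 (by omega)
        -- transform pvZero is binary, and iterating stays at pvZero; direct computation instead:
        decide
      simpa using h1
    rw [pvLoopA, hcur, hsome rfl]
    simp
  | succ M ih =>
    intro fuel seen cur i hf hz hmin hnone hsome
    obtain ⟨f, rfl⟩ : ∃ f, fuel = f + 1 := ⟨fuel - 1, by omega⟩
    have h1 : transform cur = transform^[1] cur := by simp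
    have hlook : PySem.Dict.get? seen (transform cur) = none := by
      rw [h1]; exact hnone 1 (by omega) (by omega)
    rw [pvLoopA]
    simp only [hlook]
    rw [ih f (seen.insert (transform cur) (i + 1)) (transform cur) (i + 1) (by omega)
      (by rw [← Function.iterate_succ_apply]; exact hz)
      (by intro t ht; rw [← Function.iterate_succ_apply]; exact hmin (t + 1) (by omega))
      ?_ ?_]
    · push_cast; ring
    · intro t ht1 htM
      have hkey : transform^[t] (transform cur) = transform^[t + 1] cur := by
        rw [← Function.iterate_succ_apply]
      have hne : transform^[t + 1] cur ≠ transform cur := by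
        intro heq
        have : transform^[1] cur = pvZero := by
          refine pv_periodic cur 1 (t + 1) (by omega) ?_
          rw [heq, h1]
        exact hmin 1 (by omega) this
      rw [hkey, PySem.Dict.get?_insert_of_ne _ _ hne]
      exact hnone (t + 1) (by omega) (by omega)
    · intro hM
      subst hM
      have : transform cur = pvZero := by
        rw [h1]; exact hz
      rw [← this]
      simp [PySem.Dict.get?_insert_self]
  
theorem A_eval (g : List (List Int)) : find_greatest_finite_index g = (pvN g : Int) - 1 := by
  have h := loopA_eval (pvN g) 10 ((PySem.Dict.empty : PySem.Dict (List (List Int)) Int).insert g 0) g 0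
    (by have := pvN_le g; omega) (pvN_zero g) (pvN_min g) ?_ ?_
  · rw [find_greatest_finite_index, h]; ring
  · intro t ht1 htN
    have hne : transform^[t] g ≠ g := by
      intro heq
      have : transform^[0] g = pvZero := by
        refine pv_periodic g 0 t (by omega) ?_
        simpa using heq.symm
      have hg : g = pvZero := by simpa using this
      have : pvN g = 0 := by unfold pvN; rw [if_pos hg]
      omega
    rw [PySem.Dict.get?_insert_of_ne _ _ hne]
    exact PySem.Dict.get?_empty _
  · intro hM
    have hg := pvN_eq_zero g hM
    rw [← hg]
    simp [PySem.Dict.get?_insert_self]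

theorem B_eval (g : List (List Int)) : find_greatest_finite_index_alt g = (pvN g : Int) - 1 := by
  have h := loopB_eval (pvN g) 10 g 0 (by have := pvN_le g; omega) (pvN_zero g) (pvN_min g)
  rw [find_greatest_finite_index_alt, h]; ring

-- ===== VERDICT (by name: the statement is the Claim_ definition above) =====
theorem find_greatest_finite_index_spec : Claim_equal_find_greatest_finite_index := by
  intro g _ _
  unfold Spec_find_greatest_finite_index
  rw [A_eval, B_eval]
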